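-- pv_equiv track=rewrite | github.com/sumeshyess/dppvalidator | src/dppvalidator/vocabularies/eudpp_actors.py | is_role_subclass_of
-- ===== SOURCE A (Python) =====
-- ROLE_HIERARCHY: dict[str, list[str]] = {
--     "eudpp:Role": [
--         "eudpp:EconomicOperatorRole",
--         "eudpp:AuthorityRole",
--         "eudpp:CustomerRole",
--         "eudpp:EndUserRole",
--         "eudpp:IndependentOperatorRole",
--         "eudpp:ProfessionalRepairerRole",
--         "eudpp:RecyclerRole",
--         "eudpp:RefurbisherRole",
--         "eudpp:RemanufacturerRole",
--         "eudpp:DPPServiceProviderRole",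
--         "eudpp:ConformityAssessmentBodyRole",
--         "eudpp:CredentialAgencyRole",
--         "eudpp:IssuingAgencyRole",
--     ],
--     "eudpp:EconomicOperatorRole": [
--         "eudpp:ManufacturerRole",
--         "eudpp:ImporterRole",
--         "eudpp:DistributorRole",
--         "eudpp:DealerRole",
--         "eudpp:FulfilmentServiceProviderRole",
--         "eudpp:AuthorisedRepresentativeRole",
--     ],
--     "eudpp:AuthorityRole": [
--         "eudpp:MarketSurveillanceAuthorityRole",
--         "eudpp:CustomsAuthorityRole",
--     ],
--     "eudpp:CustomerRole": [
--         "eudpp:ConsumerRole",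
--     ],
--     "eudpp:ConformityAssessmentBodyRole": [
--         "eudpp:NotifiedBodyRole",
--     ],
-- }
--
-- def is_role_subclass_of(child_uri: str, parent_uri: str) -> bool:
--     """Check if a role is a subclass of another.
--
--     Args:
--         child_uri: Potential child role URI
--         parent_uri: Potential parent role URI
--
--     Returns:
--         True if child is a subclass of parent
--     """
--     if child_uri == parent_uri:
--         return True
--
--     for parent, children in ROLE_HIERARCHY.items():
--         if child_uri in children:
--             if parent == parent_uri:
--                 return True
--             return is_role_subclass_of(parent, parent_uri)
--
--     return False
-- ===== SOURCE B (Python) =====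
-- ROLE_HIERARCHY: dict[str, list[str]] = {
--     "eudpp:Role": [
--         "eudpp:EconomicOperatorRole",
--         "eudpp:AuthorityRole",
--         "eudpp:CustomerRole",
--         "eudpp:EndUserRole",
--         "eudpp:IndependentOperatorRole",
--         "eudpp:ProfessionalRepairerRole",
--         "eudpp:RecyclerRole",
--         "eudpp:RefurbisherRole",
--         "eudpp:RemanufacturerRole",
--         "eudpp:DPPServiceProviderRole",
--         "eudpp:ConformityAssessmentBodyRole",
--         "eudpp:CredentialAgencyRole",
--         "eudpp:IssuingAgencyRole",
--     ],
--     "eudpp:EconomicOperatorRole": [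
--         "eudpp:ManufacturerRole",
--         "eudpp:ImporterRole",
--         "eudpp:DistributorRole",
--         "eudpp:DealerRole",
--         "eudpp:FulfilmentServiceProviderRole",
--         "eudpp:AuthorisedRepresentativeRole",
--     ],
--     "eudpp:AuthorityRole": [
--         "eudpp:MarketSurveillanceAuthorityRole",
--         "eudpp:CustomsAuthorityRole",
--     ],
--     "eudpp:CustomerRole": [
--         "eudpp:ConsumerRole",
--     ],
--     "eudpp:ConformityAssessmentBodyRole": [
--         "eudpp:NotifiedBodyRole",
--     ],
-- }
--
-- # Reverse index: each role has at most one parent.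
-- PARENT_OF: dict[str, str] = {
--     child: parent
--     for parent, children in ROLE_HIERARCHY.items()
--     for child in children
-- }
--
--
-- def _ancestors(child: str) -> list[str]:
--     chain = []
--     cur = child
--     while cur in PARENT_OF:
--         cur = PARENT_OF[cur]
--         chain.append(cur)
--     return chain
--
--
-- # Full ancestor table, computed once at import time.
-- ANCESTORS: dict[str, list[str]] = {child: _ancestors(child) for child in PARENT_OF}
--
--
-- def is_role_subclass_of(child_uri: str, parent_uri: str) -> bool:
--     """Check if a role is a subclass of another (precomputed ancestor table)."""
--     return child_uri == parent_uri or parent_uri in ANCESTORS.get(child_uri, [])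
-- ===== Notes on version B (the rewrite author's own statement) =====
-- stated objective: idiomatic
-- what changed: Replaced A's recursive walk that rescans every children list of the hierarchy at each step with a full ancestor table precomputed once at import time, so each call is a single dict lookup plus a membership test with no recursion or scan.
import Mathlib
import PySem

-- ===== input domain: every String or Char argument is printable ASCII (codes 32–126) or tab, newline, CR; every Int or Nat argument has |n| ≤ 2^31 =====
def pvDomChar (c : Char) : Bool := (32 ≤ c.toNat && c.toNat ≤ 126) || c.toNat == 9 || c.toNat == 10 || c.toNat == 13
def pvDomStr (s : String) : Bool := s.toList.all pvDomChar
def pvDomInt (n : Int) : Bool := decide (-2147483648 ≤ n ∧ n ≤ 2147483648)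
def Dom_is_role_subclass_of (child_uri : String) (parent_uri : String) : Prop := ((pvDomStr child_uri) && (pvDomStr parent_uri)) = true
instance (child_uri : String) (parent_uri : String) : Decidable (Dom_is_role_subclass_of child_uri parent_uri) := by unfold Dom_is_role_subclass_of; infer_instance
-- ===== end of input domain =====

-- B replaces A's recursive walk that rescans the hierarchy at every step with a full ancestor
-- table precomputed once, so each call is one lookup plus a membership test (objective: idiomatic).

-- ===== PORT A =====
def ROLE_HIERARCHY : List (String × List String) :=
  [("eudpp:Role",
    ["eudpp:EconomicOperatorRole", "eudpp:AuthorityRole", "eudpp:CustomerRole",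
     "eudpp:EndUserRole", "eudpp:IndependentOperatorRole", "eudpp:ProfessionalRepairerRole",
     "eudpp:RecyclerRole", "eudpp:RefurbisherRole", "eudpp:RemanufacturerRole",
     "eudpp:DPPServiceProviderRole", "eudpp:ConformityAssessmentBodyRole",
     "eudpp:CredentialAgencyRole", "eudpp:IssuingAgencyRole"]),
   ("eudpp:EconomicOperatorRole",
    ["eudpp:ManufacturerRole", "eudpp:ImporterRole", "eudpp:DistributorRole",
     "eudpp:DealerRole", "eudpp:FulfilmentServiceProviderRole",
     "eudpp:AuthorisedRepresentativeRole"]),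
   ("eudpp:AuthorityRole",
    ["eudpp:MarketSurveillanceAuthorityRole", "eudpp:CustomsAuthorityRole"]),
   ("eudpp:CustomerRole", ["eudpp:ConsumerRole"]),
   ("eudpp:ConformityAssessmentBodyRole", ["eudpp:NotifiedBodyRole"])]

-- A's `for parent, children in ROLE_HIERARCHY.items(): if child_uri in children: …`
-- loop, factored as: find the first entry whose children contain the child.
def findParentA (child : String) : List (String × List String) → Option String
  | [] => none
  | (parent, children) :: rest =>
      if children.contains child then some parent else findParentA child rest

-- depth of a role in the (fixed, 3-level) hierarchy; termination measure for A's port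
def roleRank (s : String) : Nat :=
  if (["eudpp:EconomicOperatorRole", "eudpp:AuthorityRole", "eudpp:CustomerRole",
      "eudpp:EndUserRole", "eudpp:IndependentOperatorRole", "eudpp:ProfessionalRepairerRole",
      "eudpp:RecyclerRole", "eudpp:RefurbisherRole", "eudpp:RemanufacturerRole",
      "eudpp:DPPServiceProviderRole", "eudpp:ConformityAssessmentBodyRole",
      "eudpp:CredentialAgencyRole", "eudpp:IssuingAgencyRole"] : List String).contains s then 1
  else if (["eudpp:ManufacturerRole", "eudpp:ImporterRole", "eudpp:DistributorRole",
      "eudpp:DealerRole", "eudpp:FulfilmentServiceProviderRole",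
      "eudpp:AuthorisedRepresentativeRole", "eudpp:MarketSurveillanceAuthorityRole",
      "eudpp:CustomsAuthorityRole", "eudpp:ConsumerRole",
      "eudpp:NotifiedBodyRole"] : List String).contains s then 2
  else 0

-- the parent found by A's scan is strictly shallower (needed for termination of the port)
theorem findParentA_rank_lt (c p : String)
    (h : findParentA c ROLE_HIERARCHY = some p) : roleRank p < roleRank c := by
  simp only [ROLE_HIERARCHY, findParentA] at h
  split_ifs at h with h1 h2 h3 h4 h5 <;>
    cases h <;>
    · have hm := List.mem_of_elem_eq_true ‹_›
      fin_cases hm <;> decide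

def is_role_subclass_of (child_uri : String) (parent_uri : String) : Bool :=
  if child_uri == parent_uri then true
  else
    match hf : findParentA child_uri ROLE_HIERARCHY with
    | none => false
    | some parent =>
        if parent == parent_uri then true
        else is_role_subclass_of parent parent_uri
termination_by roleRank child_uri
decreasing_by exact findParentA_rank_lt _ _ hf

-- ===== PORT B =====
-- PARENT_OF = {child: parent for parent, children in ROLE_HIERARCHY.items() for child in children}
def PARENT_OF : PySem.Dict String String :=
  ROLE_HIERARCHY.foldl
    (fun d pc => pc.2.foldl (fun d c => PySem.Dict.insert d c pc.1) d)
    PySem.Dict.empty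

-- _ancestors: the `cur = child; while cur in PARENT_OF: cur = PARENT_OF[cur]; chain.append(cur)`
-- loop, fuel-bounded by the number of entries of PARENT_OF (the Python loop terminates because
-- each parent is strictly shallower; the fuel only makes the identical computation total)
def ancestorsLoop : Nat → String → List String
  | 0, _ => []
  | fuel + 1, cur =>
      match PySem.Dict.get? PARENT_OF cur with
      | none => []
      | some nxt => nxt :: ancestorsLoop fuel nxt

-- ANCESTORS = {child: _ancestors(child) for child in PARENT_OF}
def ANCESTORS : PySem.Dict String (List String) :=
  (PySem.Dict.keys PARENT_OF).foldl
    (fun d c => PySem.Dict.insert d c (ancestorsLoop (PySem.Dict.size PARENT_OF) c))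
    PySem.Dict.empty

def is_role_subclass_of_alt (child_uri : String) (parent_uri : String) : Bool :=
  child_uri == parent_uri || (PySem.Dict.getD ANCESTORS child_uri []).contains parent_uri

-- ===== PRECONDITION & SPEC =====
def Spec_is_role_subclass_of (child_uri : String) (parent_uri : String) (out : Bool) : Prop := out = is_role_subclass_of_alt child_uri parent_uri
instance (child_uri : String) (parent_uri : String) (out : Bool) : Decidable (Spec_is_role_subclass_of child_uri parent_uri out) := by unfold Spec_is_role_subclass_of; infer_instance

-- ===== CLAIM (what is proved, stated in full; the proofs are below) =====
def Claim_equal_is_role_subclass_of : Prop := ∀ (child_uri : String) (parent_uri : String), Dom_is_role_subclass_of child_uri parent_uri → Spec_is_role_subclass_of child_uri parent_uri (is_role_subclass_of child_uri parent_uri)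

-- ===== LEMMAS AND PROOFS =====

-- every role occurring as a child in the hierarchy
def allChildRoles : List String :=
  ["eudpp:EconomicOperatorRole", "eudpp:AuthorityRole", "eudpp:CustomerRole",
   "eudpp:EndUserRole", "eudpp:IndependentOperatorRole", "eudpp:ProfessionalRepairerRole",
   "eudpp:RecyclerRole", "eudpp:RefurbisherRole", "eudpp:RemanufacturerRole",
   "eudpp:DPPServiceProviderRole", "eudpp:ConformityAssessmentBodyRole",
   "eudpp:CredentialAgencyRole", "eudpp:IssuingAgencyRole",
   "eudpp:ManufacturerRole", "eudpp:ImporterRole", "eudpp:DistributorRole",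
   "eudpp:DealerRole", "eudpp:FulfilmentServiceProviderRole",
   "eudpp:AuthorisedRepresentativeRole", "eudpp:MarketSurveillanceAuthorityRole",
   "eudpp:CustomsAuthorityRole", "eudpp:ConsumerRole", "eudpp:NotifiedBodyRole"]

-- a string that is no child role is found by neither A's scan nor B's ancestor table
theorem not_child_none (c : String) (hc : c ∉ allChildRoles) :
    findParentA c ROLE_HIERARCHY = none ∧ PySem.Dict.get? ANCESTORS c = none := by
  simp only [allChildRoles, List.mem_cons, List.not_mem_nil, or_false, not_or] at hc
  obtain ⟨n1, n2, n3, n4, n5, n6, n7, n8, n9, n10, n11, n12, n13, n14, n15, n16, n17, n18, n19, n20, n21, n22, n23⟩ := hc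
  have m1 : ("eudpp:EconomicOperatorRole" == c) = false := beq_eq_false_iff_ne.mpr (Ne.symm n1)
  have m2 : ("eudpp:AuthorityRole" == c) = false := beq_eq_false_iff_ne.mpr (Ne.symm n2)
  have m3 : ("eudpp:CustomerRole" == c) = false := beq_eq_false_iff_ne.mpr (Ne.symm n3)
  have m4 : ("eudpp:EndUserRole" == c) = false := beq_eq_false_iff_ne.mpr (Ne.symm n4)
  have m5 : ("eudpp:IndependentOperatorRole" == c) = false := beq_eq_false_iff_ne.mpr (Ne.symm n5)
  have m6 : ("eudpp:ProfessionalRepairerRole" == c) = false := beq_eq_false_iff_ne.mpr (Ne.symm n6)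
  have m7 : ("eudpp:RecyclerRole" == c) = false := beq_eq_false_iff_ne.mpr (Ne.symm n7)
  have m8 : ("eudpp:RefurbisherRole" == c) = false := beq_eq_false_iff_ne.mpr (Ne.symm n8)
  have m9 : ("eudpp:RemanufacturerRole" == c) = false := beq_eq_false_iff_ne.mpr (Ne.symm n9)
  have m10 : ("eudpp:DPPServiceProviderRole" == c) = false := beq_eq_false_iff_ne.mpr (Ne.symm n10)
  have m11 : ("eudpp:ConformityAssessmentBodyRole" == c) = false := beq_eq_false_iff_ne.mpr (Ne.symm n11)
  have m12 : ("eudpp:CredentialAgencyRole" == c) = false := beq_eq_false_iff_ne.mpr (Ne.symm n12)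
  have m13 : ("eudpp:IssuingAgencyRole" == c) = false := beq_eq_false_iff_ne.mpr (Ne.symm n13)
  have m14 : ("eudpp:ManufacturerRole" == c) = false := beq_eq_false_iff_ne.mpr (Ne.symm n14)
  have m15 : ("eudpp:ImporterRole" == c) = false := beq_eq_false_iff_ne.mpr (Ne.symm n15)
  have m16 : ("eudpp:DistributorRole" == c) = false := beq_eq_false_iff_ne.mpr (Ne.symm n16)
  have m17 : ("eudpp:DealerRole" == c) = false := beq_eq_false_iff_ne.mpr (Ne.symm n17)
  have m18 : ("eudpp:FulfilmentServiceProviderRole" == c) = false := beq_eq_false_iff_ne.mpr (Ne.symm n18)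
  have m19 : ("eudpp:AuthorisedRepresentativeRole" == c) = false := beq_eq_false_iff_ne.mpr (Ne.symm n19)
  have m20 : ("eudpp:MarketSurveillanceAuthorityRole" == c) = false := beq_eq_false_iff_ne.mpr (Ne.symm n20)
  have m21 : ("eudpp:CustomsAuthorityRole" == c) = false := beq_eq_false_iff_ne.mpr (Ne.symm n21)
  have m22 : ("eudpp:ConsumerRole" == c) = false := beq_eq_false_iff_ne.mpr (Ne.symm n22)
  have m23 : ("eudpp:NotifiedBodyRole" == c) = false := beq_eq_false_iff_ne.mpr (Ne.symm n23)
  constructor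
  · simp [ROLE_HIERARCHY, findParentA, n1, n2, n3, n4, n5, n6, n7, n8, n9, n10, n11, n12,
      n13, n14, n15, n16, n17, n18, n19, n20, n21, n22, n23]
  · simp [ANCESTORS, PARENT_OF, ROLE_HIERARCHY, PySem.Dict.insert, PySem.Dict.get?,
      PySem.Dict.empty, PySem.Dict.keys, PySem.Dict.size, List.find?,
      m1, m2, m3, m4, m5, m6, m7, m8, m9, m10, m11, m12, m13, m14, m15, m16, m17, m18,
      m19, m20, m21, m22, m23]

-- the table row of a child is its parent followed by the parent's row
theorem ancestors_step (c parent : String)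
    (hf : findParentA c ROLE_HIERARCHY = some parent) :
    PySem.Dict.getD ANCESTORS c [] = parent :: PySem.Dict.getD ANCESTORS parent [] := by
  by_cases hc : c ∈ allChildRoles
  · fin_cases hc <;> simp_all [ROLE_HIERARCHY, findParentA] <;> subst hf <;> decide
  · exact absurd hf (by simp [(not_child_none c hc).1])

-- a child with no parent in A's scan has an empty (or missing) table row
theorem ancestors_none (c : String) (hf : findParentA c ROLE_HIERARCHY = none) :
    PySem.Dict.getD ANCESTORS c [] = [] := by
  by_cases hc : c ∈ allChildRoles
  · fin_cases hc <;> simp [ROLE_HIERARCHY, findParentA] at hf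
  · simp [PySem.Dict.getD_eq_get?_getD, (not_child_none c hc).2]

theorem ports_agree (c p : String) :
    is_role_subclass_of c p = is_role_subclass_of_alt c p := by
  induction c using is_role_subclass_of.induct (parent_uri := p) with
  | case1 x h =>
    rw [is_role_subclass_of, is_role_subclass_of_alt]
    simp [h]
  | case2 x h hf =>
    rw [is_role_subclass_of, is_role_subclass_of_alt]
    simp only [h, Bool.false_eq_true, if_false]
    split
    · simp [ancestors_none x hf]
    · simp_all
  | case3 x h parent hf hp =>
    rw [is_role_subclass_of, is_role_subclass_of_alt]
    simp only [h, Bool.false_eq_true, if_false]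
    split
    · rename_i hq
      rw [hf] at hq; simp at hq
    · rename_i q hq
      rw [hf] at hq; cases hq
      have hpe : parent = p := by simpa using hp
      subst hpe
      simp [ancestors_step _ _ hf]
  | case4 x h parent hf hp ih =>
    rw [is_role_subclass_of, is_role_subclass_of_alt]
    simp only [h, Bool.false_eq_true, if_false]
    split
    · rename_i hq
      rw [hf] at hq; simp at hq
    · rename_i q hq
      rw [hf] at hq; cases hq
      simp only [hp, Bool.false_eq_true, if_false]
      rw [ih, is_role_subclass_of_alt, ancestors_step x parent hf]
      have hne : parent ≠ p := by simpa using hp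
      simp [hne, Ne.symm hne]

-- ===== VERDICT (by name: the statement is the Claim_ definition above) =====
theorem is_role_subclass_of_spec : Claim_equal_is_role_subclass_of := by
  intro c p _
  unfold Spec_is_role_subclass_of
  exact ports_agree c p
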